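-- pv_equiv track=rewrite | github.com/pthomas26/TP1---Sokoban-Solver | board_parser.py | parse_board
-- ===== SOURCE A (Python) =====
-- def parse_board(lines):
--     """
--     Convert a list of grid lines into game elements.
--
--     Pre-processing:
--       1. Strip the common leading whitespace so coordinates start at column 0.
--       2. Pad all rows to the same width with spaces.
--
--     Character mapping:
--       '#'  wall        '.'  target (empty)    ' '  empty floor
--       '@'  player      '+'  player on target
--       '$'  box         '*'  box on target
--
--     Returns:
--         player_start  (row, col)
--         boxes         frozenset of (row, col)
--         targets       frozenset of (row, col)
--         walls         frozenset of (row, col)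
--         grid_size     (rows, cols)
--
--     Raises:
--         ValueError if no player, no boxes, or no targets are found.
--     """
--     non_empty = [l for l in lines if l.strip()]
--     if not non_empty:
--         raise ValueError("Empty board")
--
--     min_indent = min(len(l) - len(l.lstrip(" ")) for l in non_empty)
--     lines = [l[min_indent:] for l in lines]
--
--     max_width = max(len(l) for l in lines)
--     lines = [l.ljust(max_width) for l in lines]
--
--     grid_size    = (len(lines), max_width)
--     player_start = None
--     boxes, targets, walls = [], [], []
--
--     for r, row in enumerate(lines):
--         for c, ch in enumerate(row):
--             if   ch == "#": walls.append((r, c))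
--             elif ch == ".": targets.append((r, c))
--             elif ch == "@": player_start = (r, c)
--             elif ch == "+": player_start = (r, c); targets.append((r, c))
--             elif ch == "$": boxes.append((r, c))
--             elif ch == "*": boxes.append((r, c)); targets.append((r, c))
--
--     if player_start is None:
--         raise ValueError("No player (@) found in board")
--     if not boxes:
--         raise ValueError("No boxes ($) found in board")
--     if not targets:
--         raise ValueError("No targets (.) found in board")
--
--     return (player_start,
--             frozenset(boxes),
--             frozenset(targets),
--             frozenset(walls),
--             grid_size)
-- ===== SOURCE B (Python) =====
-- def parse_board(lines):
--     non_empty = [l for l in lines if l.strip()]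
--     if not non_empty:
--         raise ValueError("Empty board")
--
--     min_indent = min(len(l) - len(l.lstrip(" ")) for l in non_empty)
--     lines = [l[min_indent:] for l in lines]
--
--     max_width = max(len(l) for l in lines)
--     lines = [l.ljust(max_width) for l in lines]
--
--     grid_size = (len(lines), max_width)
--
--     def cat(chars):
--         return [(r, c)
--                 for r, row in enumerate(lines)
--                 for c, ch in enumerate(row)
--                 if ch in chars]
--
--     players = cat("@+")
--     player_start = players[-1] if players else None
--     boxes = cat("$*")
--     targets = cat(".+*")
--     walls = cat("#")
--
--     if player_start is None:
--         raise ValueError("No player (@) found in board")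
--     if not boxes:
--         raise ValueError("No boxes ($) found in board")
--     if not targets:
--         raise ValueError("No targets (.) found in board")
--
--     return (player_start,
--             frozenset(boxes),
--             frozenset(targets),
--             frozenset(walls),
--             grid_size)
-- ===== Notes on version B (the rewrite author's own statement) =====
-- stated objective: simpler
-- what changed: Replaced the single row-by-column state-accumulating loop (four mutable lists plus an overwritten player variable) with one independent comprehension scan per category, the player being the last matching cell; preprocessing and validation order are unchanged.
import Mathlib
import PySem

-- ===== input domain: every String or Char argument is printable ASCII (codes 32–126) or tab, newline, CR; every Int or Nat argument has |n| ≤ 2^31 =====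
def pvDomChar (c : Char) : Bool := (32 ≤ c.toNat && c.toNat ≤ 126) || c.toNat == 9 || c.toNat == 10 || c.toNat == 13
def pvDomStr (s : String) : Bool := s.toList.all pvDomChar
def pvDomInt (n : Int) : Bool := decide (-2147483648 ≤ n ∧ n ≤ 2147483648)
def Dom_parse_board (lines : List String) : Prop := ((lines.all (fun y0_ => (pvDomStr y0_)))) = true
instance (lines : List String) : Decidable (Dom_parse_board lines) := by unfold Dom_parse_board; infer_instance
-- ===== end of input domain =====

-- B replaces A's single row×col accumulating loop by one independent scan per category
-- (player = last matching cell); preprocessing and validation order are unchanged (objective: simpler).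

-- Shared preprocessing (identical lines of Python in A and in B): de-indent by the minimal
-- leading-space count of the non-blank lines, pad every line to the maximal width with spaces.
-- l.lstrip(" ") = dropWhile (· == ' ') (exact: only spaces stripped); l[min_indent:] = drop
-- (the start is a non-negative in-range-or-clamped index); l.ljust(w) = pad with spaces.
def pvPrep (lines : List String) : List (List Char) × (Int × Int) :=
  let ls := lines.map String.toList
  let minIndent :=
    (((ls.filter (fun l => PySem.Chars.strip l ≠ [])).map
        (fun l => l.length - (l.dropWhile (· == ' ')).length)).min?).getD 0
  let ls := ls.map (fun l => l.drop minIndent)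
  let maxW := ((ls.map List.length).max?).getD 0
  let ls := ls.map (fun l => l ++ List.replicate (maxW - l.length) ' ')
  (ls, ((lines.length : Int), (maxW : Int)))

-- ===== PORT A =====
-- the body of A's inner loop: one character, same branch order as the Python
def pbStep (r : Int)
    (st : Option (Int × Int) × List (Int × Int) × List (Int × Int) × List (Int × Int))
    (cch : Int × Char) :
    Option (Int × Int) × List (Int × Int) × List (Int × Int) × List (Int × Int) :=
  let pos := (r, cch.1)
  if cch.2 == '#' then (st.1, st.2.1, st.2.2.1, st.2.2.2 ++ [pos])
  else if cch.2 == '.' then (st.1, st.2.1, st.2.2.1 ++ [pos], st.2.2.2)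
  else if cch.2 == '@' then (some pos, st.2.1, st.2.2.1, st.2.2.2)
  else if cch.2 == '+' then (some pos, st.2.1, st.2.2.1 ++ [pos], st.2.2.2)
  else if cch.2 == '$' then (st.2.1 ++ [pos], st.2.2.1, st.2.2.2) |> (fun t => (st.1, t))
  else if cch.2 == '*' then (st.1, st.2.1 ++ [pos], st.2.2.1 ++ [pos], st.2.2.2)
  else st

def parse_board (lines : List String) :
    (Int × Int) × (List (Int × Int)) × (List (Int × Int)) × (List (Int × Int)) × (Int × Int) :=
  let nonEmpty := lines.filter (fun l => PySem.Str.strip l ≠ "")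
  if nonEmpty.isEmpty then ((0, 0), [], [], [], (0, 0))   -- Python raises ValueError "Empty board"
  else
    let pr := pvPrep lines
    let st := (PySem.List.enumerate pr.1).foldl
        (fun st rrow => (PySem.List.enumerate rrow.2).foldl (pbStep rrow.1) st)
        ((none : Option (Int × Int)), ([] : List (Int × Int)), ([] : List (Int × Int)),
          ([] : List (Int × Int)))
    match st.1 with
    | none => ((0, 0), [], [], [], (0, 0))                -- Python raises: no player
    | some p =>
      if st.2.1.isEmpty then ((0, 0), [], [], [], (0, 0)) -- Python raises: no boxes
      else if st.2.2.1.isEmpty then ((0, 0), [], [], [], (0, 0)) -- Python raises: no targets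
      else (p, PySem.Set.ofList st.2.1, PySem.Set.ofList st.2.2.1,
            PySem.Set.ofList st.2.2.2, pr.2)

-- ===== PORT B =====
-- B's cat(chars): one comprehension scan of the padded grid per category
def pbCat (grid : List (List Char)) (chars : List Char) : List (Int × Int) :=
  (PySem.List.enumerate grid).flatMap (fun rrow =>
    ((PySem.List.enumerate rrow.2).filter (fun cch => chars.contains cch.2)).map
      (fun cch => (rrow.1, cch.1)))

def parse_board_alt (lines : List String) :
    (Int × Int) × (List (Int × Int)) × (List (Int × Int)) × (List (Int × Int)) × (Int × Int) :=
  let nonEmpty := lines.filter (fun l => PySem.Str.strip l ≠ "")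
  if nonEmpty.isEmpty then ((0, 0), [], [], [], (0, 0))   -- Python raises ValueError "Empty board"
  else
    let pr := pvPrep lines
    let players := pbCat pr.1 ['@', '+']
    let boxes := pbCat pr.1 ['$', '*']
    let targets := pbCat pr.1 ['.', '+', '*']
    let walls := pbCat pr.1 ['#']
    match players.getLast? with
    | none => ((0, 0), [], [], [], (0, 0))                -- Python raises: no player
    | some p =>
      if boxes.isEmpty then ((0, 0), [], [], [], (0, 0))  -- Python raises: no boxes
      else if targets.isEmpty then ((0, 0), [], [], [], (0, 0)) -- Python raises: no targets
      else (p, PySem.Set.ofList boxes, PySem.Set.ofList targets,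
            PySem.Set.ofList walls, pr.2)

-- ===== PRECONDITION & SPEC =====
-- Pre_ excludes exactly the inputs on which the Python A raises ValueError: boards with no
-- player cell ('@'/'+'), no box cell ('$'/'*'), or no target cell ('.'/'+'/'*').
def Pre_parse_board (lines : List String) : Prop :=
  (∃ l ∈ lines, '@' ∈ l.toList ∨ '+' ∈ l.toList) ∧
  (∃ l ∈ lines, '$' ∈ l.toList ∨ '*' ∈ l.toList) ∧
  (∃ l ∈ lines, '.' ∈ l.toList ∨ '+' ∈ l.toList ∨ '*' ∈ l.toList)
instance (lines : List String) : Decidable (Pre_parse_board lines) := by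
  unfold Pre_parse_board; infer_instance

def pvWitness_parse_board : List String := ["#@$."]

def Spec_parse_board (lines : List String)
    (out : (Int × Int) × (List (Int × Int)) × (List (Int × Int)) × (List (Int × Int)) × (Int × Int)) :
    Prop := out = parse_board_alt lines
instance (lines : List String)
    (out : (Int × Int) × (List (Int × Int)) × (List (Int × Int)) × (List (Int × Int)) × (Int × Int)) :
    Decidable (Spec_parse_board lines out) := by unfold Spec_parse_board; infer_instance

-- ===== CLAIM (what is proved, stated in full; the proofs are below) =====
def Claim_equal_parse_board : Prop :=
  ∀ (lines : List String), Dom_parse_board lines → Pre_parse_board lines →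
    Spec_parse_board lines (parse_board lines)

-- ===== LEMMAS AND PROOFS =====

theorem getLast?_cons_or {α : Type} (a : α) (l : List α) :
    (a :: l).getLast? = l.getLast?.or (some a) := by
  induction l generalizing a with
  | nil => rfl
  | cons b l ih =>
    rw [List.getLast?_cons_cons, ih b, Option.or_assoc]
    cases l.getLast? <;> rfl

-- what one row of A's inner loop does to an arbitrary state
theorem pbStep_row (L : List (Int × Char)) (r : Int)
    (p : Option (Int × Int)) (bs ts ws : List (Int × Int)) :
    L.foldl (pbStep r) (p, bs, ts, ws) =
      ((((L.filter (fun cch => ['@', '+'].contains cch.2)).map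
          (fun cch => ((r, cch.1) : Int × Int))).getLast?).or p,
       bs ++ (L.filter (fun cch => ['$', '*'].contains cch.2)).map (fun cch => (r, cch.1)),
       ts ++ (L.filter (fun cch => ['.', '+', '*'].contains cch.2)).map (fun cch => (r, cch.1)),
       ws ++ (L.filter (fun cch => ['#'].contains cch.2)).map (fun cch => (r, cch.1))) := by
  induction L generalizing p bs ts ws with
  | nil => simp
  | cons x L ih =>
    by_cases h1 : x.2 = '#'
    · simp [pbStep, h1, ih, List.append_assoc]
    · by_cases h2 : x.2 = '.'
      · simp [pbStep, h2, ih, List.append_assoc]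
      · by_cases h3 : x.2 = '@'
        · simp [pbStep, h3, ih, getLast?_cons_or]
        · by_cases h4 : x.2 = '+'
          · simp [pbStep, h4, ih, getLast?_cons_or, List.append_assoc]
          · by_cases h5 : x.2 = '$'
            · simp [pbStep, h5, ih, List.append_assoc]
            · by_cases h6 : x.2 = '*'
              · simp [pbStep, h6, ih, List.append_assoc]
              · simp [pbStep, h1, h2, h3, h4, h5, h6, ih]

-- pbCat generalized to an arbitrary enumerate start, for the outer induction
def pbCatS (grid : List (List Char)) (s : Int) (chars : List Char) : List (Int × Int) :=
  (PySem.List.enumerate grid s).flatMap (fun rrow =>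
    ((PySem.List.enumerate rrow.2).filter (fun cch => chars.contains cch.2)).map
      (fun cch => (rrow.1, cch.1)))

theorem pbCat_eq_pbCatS (grid : List (List Char)) (chars : List Char) :
    pbCat grid chars = pbCatS grid 0 chars := rfl

theorem pbStep_grid (rows : List (List Char)) (s : Int)
    (p : Option (Int × Int)) (bs ts ws : List (Int × Int)) :
    (PySem.List.enumerate rows s).foldl
        (fun st rrow => (PySem.List.enumerate rrow.2).foldl (pbStep rrow.1) st) (p, bs, ts, ws) =
      ((pbCatS rows s ['@', '+']).getLast?.or p,
       bs ++ pbCatS rows s ['$', '*'],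
       ts ++ pbCatS rows s ['.', '+', '*'],
       ws ++ pbCatS rows s ['#']) := by
  induction rows generalizing s p bs ts ws with
  | nil => simp [pbCatS, PySem.List.enumerate_nil]
  | cons row rows ih =>
    simp only [pbCatS, PySem.List.enumerate_cons, List.foldl_cons, List.flatMap_cons]
    rw [pbStep_row, ih]
    simp [pbCatS, List.getLast?_append, Option.or_assoc, List.append_assoc]

-- ===== VERDICT (by name: the statement is the Claim_ definition above) =====
theorem parse_board_spec : Claim_equal_parse_board := by
  intro lines _ _
  show parse_board lines = parse_board_alt lines
  unfold parse_board parse_board_alt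
  simp only [pbStep_grid, pbCat_eq_pbCatS]
  simp
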